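-- pv_equiv track=rewrite | github.com/a-p-z/gitstats | core/gitblame.py | __join_raw_blame
-- ===== SOURCE A (Python) =====
-- from typing import List
--
-- def __join_raw_blame(raw_blame: List[str]) -> List[str]:
--     blame = list()
--     tmp = list()
--
--     for line in raw_blame:
--         tmp.append(line)
--         if not line:
--             continue
--         elif line[0] == "\t":
--             blame.append("\n".join(tmp))
--             tmp = list()
--
--     return blame
-- ===== SOURCE B (Python) =====
-- from typing import List
--
-- def __join_raw_blame(raw_blame: List[str]) -> List[str]:
--     bounds = [i for i, l in enumerate(raw_blame) if l and l[0] == "\t"]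
--     blame = []
--     start = 0
--     for b in bounds:
--         blame.append("\n".join(raw_blame[start:b + 1]))
--         start = b + 1
--     return blame
-- ===== Notes on version B (the rewrite author's own statement) =====
-- stated objective: alternative
-- what changed: Replaces A's single pass with a mutable pending-lines buffer that is flushed at each tab-line by two passes: a comprehension that collects the boundary indices, then slicing the original list between consecutive boundaries and joining each slice.
import Mathlib
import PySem

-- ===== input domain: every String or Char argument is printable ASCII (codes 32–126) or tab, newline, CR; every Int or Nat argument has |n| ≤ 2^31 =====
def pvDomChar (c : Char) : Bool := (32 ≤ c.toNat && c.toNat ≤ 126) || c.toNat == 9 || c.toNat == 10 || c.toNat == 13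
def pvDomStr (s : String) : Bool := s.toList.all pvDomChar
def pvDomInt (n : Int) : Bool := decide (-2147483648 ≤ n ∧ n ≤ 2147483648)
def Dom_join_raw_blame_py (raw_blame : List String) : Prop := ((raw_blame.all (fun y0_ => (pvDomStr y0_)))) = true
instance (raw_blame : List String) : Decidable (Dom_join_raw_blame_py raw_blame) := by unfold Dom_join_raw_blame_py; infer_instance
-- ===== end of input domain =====

-- B replaces A's one-pass pending-buffer accumulation by a two-pass scheme (collect boundary
-- indices, then slice-and-join between consecutive boundaries); alternative decomposition, same cost.


-- ===== PORT A =====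
-- loop body of A: append line to tmp; skip empty lines; on a tab-starting line flush tmp into blame
def pvStepA (st : List String × List String) (line : String) : List String × List String :=
  let tmp := st.2 ++ [line]
  if line = "" then (st.1, tmp)
  else if PySem.Str.pyGet? line 0 = some '\t' then (st.1 ++ [PySem.Str.join "\n" tmp], [])
  else (st.1, tmp)

def join_raw_blame_py (raw_blame : List String) : List String :=
  (raw_blame.foldl pvStepA (([] : List String), ([] : List String))).1

-- ===== PORT B =====
-- loop body of B: emit the slice from start to just past the boundary, advance start
def pvStepB (full : List String) (st : List String × Int) (b : Int) : List String × Int :=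
  (st.1 ++ [PySem.Str.join "\n" (PySem.List.slice full (some st.2) (some (b + 1)))], b + 1)

def join_raw_blame_py_alt (raw_blame : List String) : List String :=
  let bounds : List Int := (PySem.List.enumerate raw_blame 0).filterMap
    (fun p => if p.2 ≠ "" ∧ PySem.Str.pyGet? p.2 0 = some '\t' then some p.1 else none)
  (bounds.foldl (pvStepB raw_blame) (([] : List String), (0 : Int))).1

-- ===== PRECONDITION & SPEC =====
def Spec_join_raw_blame_py (raw_blame : List String) (out : List String) : Prop := out = join_raw_blame_py_alt raw_blame
instance (raw_blame : List String) (out : List String) : Decidable (Spec_join_raw_blame_py raw_blame out) := by unfold Spec_join_raw_blame_py; infer_instance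

-- ===== CLAIM (what is proved, stated in full; the proofs are below) =====
def Claim_equal_join_raw_blame_py : Prop := ∀ (raw_blame : List String), Dom_join_raw_blame_py raw_blame → Spec_join_raw_blame_py raw_blame (join_raw_blame_py raw_blame)

-- ===== LEMMAS AND PROOFS =====

-- reference segmentation: records ended by a tab-starting nonempty line, `tmp` the pending prefix
def pvSegs (tmp : List String) : List String → List String
  | [] => []
  | l :: ls =>
    if l ≠ "" ∧ PySem.Str.pyGet? l 0 = some '\t'
    then PySem.Str.join "\n" (tmp ++ [l]) :: pvSegs [] ls
    else pvSegs (tmp ++ [l]) ls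

theorem pvFoldA_eq (xs : List String) : ∀ (blame tmp : List String),
    (xs.foldl pvStepA (blame, tmp)).1 = blame ++ pvSegs tmp xs := by
  induction xs with
  | nil => intro blame tmp; simp [pvSegs]
  | cons l ls ih =>
    intro blame tmp
    rw [List.foldl_cons]
    by_cases h1 : l = ""
    · have hs : pvStepA (blame, tmp) l = (blame, tmp ++ [l]) := by
        simp [pvStepA, h1]
      have hseg : pvSegs tmp (l :: ls) = pvSegs (tmp ++ [l]) ls := by
        rw [pvSegs, if_neg (by simp [h1])]
      rw [hs, ih, hseg]
    · by_cases h2 : PySem.Str.pyGet? l 0 = some '\t'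
      · have hs : pvStepA (blame, tmp) l
            = (blame ++ [PySem.Str.join "\n" (tmp ++ [l])], []) := by
          simp only [pvStepA, if_neg h1]
          rw [if_pos h2]
        have hseg : pvSegs tmp (l :: ls)
            = PySem.Str.join "\n" (tmp ++ [l]) :: pvSegs [] ls := by
          rw [pvSegs, if_pos ⟨h1, h2⟩]
        rw [hs, ih, hseg]; simp
      · have hs : pvStepA (blame, tmp) l = (blame, tmp ++ [l]) := by
          simp only [pvStepA, if_neg h1]
          rw [if_neg h2]
        have hseg : pvSegs tmp (l :: ls) = pvSegs (tmp ++ [l]) ls := by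
          rw [pvSegs, if_neg (by rintro ⟨-, h⟩; exact h2 h)]
        rw [hs, ih, hseg]

theorem pvFoldB_eq (full : List String) : ∀ (xs front pre acc : List String),
    full = front ++ pre ++ xs →
    (((PySem.List.enumerate xs (((front.length + pre.length : Nat) : Int))).filterMap
        (fun p => if p.2 ≠ "" ∧ PySem.Str.pyGet? p.2 0 = some '\t' then some p.1 else none)).foldl
      (pvStepB full) (acc, ((front.length : Nat) : Int))).1
    = acc ++ pvSegs pre xs := by
  intro xs
  induction xs with
  | nil => intro front pre acc _; simp [PySem.List.enumerate_nil, pvSegs]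
  | cons l ls ih =>
    intro front pre acc hfull
    rw [PySem.List.enumerate_cons]
    by_cases hb : l ≠ "" ∧ PySem.Str.pyGet? l 0 = some '\t'
    · have hfa : (fun (p : Int × String) =>
          if p.2 ≠ "" ∧ PySem.Str.pyGet? p.2 0 = some '\t' then some p.1 else none)
          (((front.length + pre.length : Nat) : Int), l)
          = some ((front.length + pre.length : Nat) : Int) := if_pos hb
      simp only [List.filterMap_cons, hfa, List.foldl_cons]
      have hcast : (((front.length + pre.length : Nat) : Int) + 1)
          = ((front.length + pre.length + 1 : Nat) : Int) := by push_cast; ring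
      have hstep : pvStepB full (acc, ((front.length : Nat) : Int))
            (((front.length + pre.length : Nat) : Int))
          = (acc ++ [PySem.Str.join "\n" (pre ++ [l])],
             ((front.length + pre.length + 1 : Nat) : Int)) := by
        simp only [pvStepB, Prod.mk.injEq]
        refine ⟨?_, hcast⟩
        subst hfull
        rw [hcast, PySem.List.slice_natCast, List.append_assoc, List.drop_left,
            show front.length + pre.length + 1 - front.length = pre.length + 1 by omega,
            List.take_append, List.take_of_length_le (Nat.le_succ pre.length)]
        simp
      rw [hstep, hcast]
      have hrec := ih (front ++ pre ++ [l]) [] (acc ++ [PySem.Str.join "\n" (pre ++ [l])])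
        (by rw [hfull]; simp)
      simp only [List.length_append, List.length_cons, List.length_nil, Nat.add_zero] at hrec
      rw [hrec]
      have hseg : pvSegs pre (l :: ls)
          = PySem.Str.join "\n" (pre ++ [l]) :: pvSegs [] ls := by
        rw [pvSegs, if_pos hb]
      rw [hseg]; simp
    · have hfa : (fun (p : Int × String) =>
          if p.2 ≠ "" ∧ PySem.Str.pyGet? p.2 0 = some '\t' then some p.1 else none)
          (((front.length + pre.length : Nat) : Int), l) = none := if_neg hb
      simp only [List.filterMap_cons, hfa]
      have hcast : (((front.length + pre.length : Nat) : Int) + 1)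
          = ((front.length + (pre.length + 1) : Nat) : Int) := by push_cast; ring
      rw [hcast]
      have hrec := ih front (pre ++ [l]) acc (by rw [hfull]; simp)
      simp only [List.length_append, List.length_cons, List.length_nil] at hrec
      rw [hrec]
      have hseg : pvSegs pre (l :: ls) = pvSegs (pre ++ [l]) ls := by
        rw [pvSegs, if_neg hb]
      rw [hseg]

-- ===== VERDICT (by name: the statement is the Claim_ definition above) =====
theorem join_raw_blame_py_spec : Claim_equal_join_raw_blame_py := by
  intro raw_blame _
  unfold Spec_join_raw_blame_py join_raw_blame_py join_raw_blame_py_alt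
  rw [pvFoldA_eq]
  have h := pvFoldB_eq raw_blame raw_blame [] [] [] (by simp)
  simpa using h.symm
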